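-- pv_equiv track=rewrite | github.com/DaikiShimada/aoj-exercise | src/volume_0/0011_Drawing_Lots.py | amida
-- ===== SOURCE A (Python) =====
-- def amida(w, side_bar):
--     result = []
--     side_bar.reverse()
--     for x in range(1, w+1):
--         status = x
--         for bar in side_bar:
--             if status == bar[0]:
--                 status = bar[1]
--             elif status == bar[1]:
--                 status = bar[0]
--         result.append(status)
--     return result
-- ===== SOURCE B (Python) =====
-- # B: compose the bars into a single permutation (as a dict) in one pass,
-- # then read off the final column for every start in one more pass: O(w+m)
-- # instead of A's O(w*m).  Note: A reverses side_bar in place; B does not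
-- # mutate its argument (the equivalence claimed is about the return value).
-- def amida(w, side_bar):
--     F = {}
--     for bar in side_bar:
--         a, b = bar[0], bar[1]
--         F[a], F[b] = F.get(b, b), F.get(a, a)
--     return [F.get(x, x) for x in range(1, w + 1)]
-- ===== Notes on version B (the rewrite author's own statement) =====
-- stated objective: faster
-- what changed: Instead of re-walking all bars for every start column, B folds all bars once into a single permutation dictionary (each bar is one O(1) right-composition/swap) and then reads the final column of each start in one pass; A also reverses side_bar in place, B does not mutate it.
-- outside the precondition, e.g. on amida(-1, [(), (0,)]): A returns [], B raises IndexError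
import Mathlib
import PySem

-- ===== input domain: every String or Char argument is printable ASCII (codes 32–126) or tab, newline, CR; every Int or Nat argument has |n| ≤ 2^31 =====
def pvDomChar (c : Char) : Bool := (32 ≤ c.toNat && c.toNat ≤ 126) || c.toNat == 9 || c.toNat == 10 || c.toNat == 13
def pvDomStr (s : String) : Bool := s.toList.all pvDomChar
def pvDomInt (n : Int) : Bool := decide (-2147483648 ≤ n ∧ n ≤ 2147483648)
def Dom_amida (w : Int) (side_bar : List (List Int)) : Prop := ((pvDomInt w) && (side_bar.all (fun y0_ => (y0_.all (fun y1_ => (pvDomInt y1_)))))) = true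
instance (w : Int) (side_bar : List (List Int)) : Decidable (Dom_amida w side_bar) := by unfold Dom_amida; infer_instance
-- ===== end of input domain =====

-- B folds all bars once into one permutation dictionary instead of re-walking the bars
-- for every start column (O(w+m) vs O(w*m)); A reverses side_bar in place, B does not
-- mutate it — the equivalence proved is about the return value.

-- ===== PORT A =====
-- bar[0] / bar[1] raise IndexError on bars shorter than 2; Pre_amida excludes those,
-- so the '.getD 0' fallback is never reached on admitted inputs.
def amida (w : Int) (side_bar : List (List Int)) : List Int :=
  let sb := side_bar.reverse
  (PySem.List.pyRange 1 (w + 1) 1).foldl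
    (fun result x =>
      let status := sb.foldl
        (fun status bar =>
          let b0 := (PySem.List.pyGet? bar 0).getD 0
          let b1 := (PySem.List.pyGet? bar 1).getD 0
          if status = b0 then b1 else if status = b1 then b0 else status)
        x
      result ++ [status])
    []

-- ===== PORT B =====
def amida_alt (w : Int) (side_bar : List (List Int)) : List Int :=
  let F := side_bar.foldl
    (fun (F : PySem.Dict Int Int) bar =>
      let a := (PySem.List.pyGet? bar 0).getD 0
      let b := (PySem.List.pyGet? bar 1).getD 0
      let va := F.getD a a
      let vb := F.getD b b
      (F.insert a vb).insert b va)
    PySem.Dict.empty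
  (PySem.List.pyRange 1 (w + 1) 1).map (fun x => F.getD x x)

-- ===== PRECONDITION & SPEC =====
-- Pre_ excludes inputs containing a bar with fewer than two entries: there A raises
-- IndexError whenever w >= 1 (it reads bar[0] and bar[1]); when w <= 0 A returns []
-- without ever reading the bars, but B's one-pass fold reads every bar and raises.
def Pre_amida (w : Int) (side_bar : List (List Int)) : Prop :=
  ∀ bar ∈ side_bar, 2 ≤ bar.length
instance (w : Int) (side_bar : List (List Int)) : Decidable (Pre_amida w side_bar) := by
  unfold Pre_amida; infer_instance
def pvWitness_amida : Int × List (List Int) := (3, [[1, 2], [2, 3]])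
def Spec_amida (w : Int) (side_bar : List (List Int)) (out : List Int) : Prop := out = amida_alt w side_bar
instance (w : Int) (side_bar : List (List Int)) (out : List Int) : Decidable (Spec_amida w side_bar out) := by unfold Spec_amida; infer_instance

-- ===== CLAIM (what is proved, stated in full; the proofs are below) =====
def Claim_equal_amida : Prop := ∀ (w : Int) (side_bar : List (List Int)), Dom_amida w side_bar → Pre_amida w side_bar → Spec_amida w side_bar (amida w side_bar)

-- ===== LEMMAS AND PROOFS =====

-- the append-accumulator loop of A builds the map of the per-start status function
theorem pv_foldl_append_map {α β : Type} (f : α → β) :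
    ∀ (l : List α) (acc : List β),
      l.foldl (fun acc x => acc ++ [f x]) acc = acc ++ l.map f := by
  intro l
  induction l with
  | nil => simp
  | cons a l ih => intro acc; simp [List.foldl, ih]

-- one bar, composed on the right of the permutation dictionary, is one swap of values
theorem pv_step (F : PySem.Dict Int Int) (a b y : Int) :
    ((F.insert a (F.getD b b)).insert b (F.getD a a)).getD y y
      = (fun t => F.getD t t) (if y = a then b else if y = b then a else y) := by
  by_cases hb : y = b
  · subst hb
    by_cases ha : y = a
    · subst ha
      simp [PySem.Dict.getD_insert]
    · simp [PySem.Dict.getD_insert, ha]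
  · by_cases ha : y = a
    · subst ha
      simp [PySem.Dict.getD_insert, hb, Ne.symm hb]
    · simp [PySem.Dict.getD_insert, ha, hb]

-- folding the bars into the dictionary computes A's foldr of transpositions
theorem pv_dict_fold :
    ∀ (l : List (List Int)) (F : PySem.Dict Int Int) (x : Int),
      (l.foldl
        (fun (F : PySem.Dict Int Int) bar =>
          let a := (PySem.List.pyGet? bar 0).getD 0
          let b := (PySem.List.pyGet? bar 1).getD 0
          (F.insert a (F.getD b b)).insert b (F.getD a a)) F).getD x x
      = (fun t => F.getD t t)
          (l.foldr
            (fun bar s =>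
              let b0 := (PySem.List.pyGet? bar 0).getD 0
              let b1 := (PySem.List.pyGet? bar 1).getD 0
              if s = b0 then b1 else if s = b1 then b0 else s) x) := by
  intro l
  induction l with
  | nil => intro F x; rfl
  | cons bar l ih =>
    intro F x
    simp only [List.foldl_cons, List.foldr_cons]
    rw [ih]
    exact pv_step F _ _ _

-- ===== VERDICT (by name: the statement is the Claim_ definition above) =====
theorem amida_spec : Claim_equal_amida := by
  intro w side_bar _ _
  unfold Spec_amida amida amida_alt
  simp only [pv_foldl_append_map, List.nil_append, List.foldl_reverse]
  apply List.map_congr_left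
  intro x _
  rw [pv_dict_fold]
  simp [PySem.Dict.getD_empty]
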